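-- pv_equiv track=rewrite | github.com/lsh23/algorithm-exercise | KMP/문자열제곱.py | solve
-- ===== SOURCE A (Python) =====
-- def solve(s: str) -> int:
--     n: int = len(s)
--
--     j: int = 0
--     f: list[int] = [0] * n
--
--     for i in range(1, n):
--         while j > 0 and s[i] != s[j]:
--             j = f[j - 1]
--         if s[i] == s[j]:
--             f[i] = j + 1
--             j += 1
--
--     if n % (n - f[n - 1]) != 0:
--         return 1
--     else:
--         return n // (n - f[n - 1])
--
--     return answer
-- ===== SOURCE B (Python) =====
-- def solve(s: str) -> int:
--     n = len(s)
--     # longest proper border of s, found by direct prefix/suffix comparison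
--     b = max(t for t in range(n) if s[:t] == s[n - t:])
--     p = n - b
--     return n // p if n % p == 0 else 1
-- ===== Notes on version B (the rewrite author's own statement) =====
-- stated objective: simpler
-- what changed: Replaced the KMP failure-function loop by a direct computation of the longest proper border (max t with s[:t] == s[n-t:]), keeping the same final period arithmetic; Pre_ excludes the empty string, on which A raises IndexError (f[-1] on an empty list) and B raises ValueError.
import Mathlib
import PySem

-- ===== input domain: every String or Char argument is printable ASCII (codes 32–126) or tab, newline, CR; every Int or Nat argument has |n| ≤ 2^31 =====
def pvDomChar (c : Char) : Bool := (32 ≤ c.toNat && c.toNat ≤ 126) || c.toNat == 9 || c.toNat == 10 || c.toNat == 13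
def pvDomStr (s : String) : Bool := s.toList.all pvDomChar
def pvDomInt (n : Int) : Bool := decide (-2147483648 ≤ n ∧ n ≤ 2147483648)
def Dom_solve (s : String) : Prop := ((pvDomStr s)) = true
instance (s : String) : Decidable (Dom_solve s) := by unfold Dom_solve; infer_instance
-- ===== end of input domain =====

-- B replaces A's KMP failure-function computation of the minimal period by a direct
-- brute-force search for the longest proper border; same final arithmetic (objective: simpler).

-- ===== PORT A =====
-- the inner `while j > 0 and s[i] != s[j]: j = f[j-1]` loop; fuel only makes it total
-- (fuel = entry value of j always suffices, since j strictly decreases on real runs)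
def kmpWhile (l : List Char) (f : List Nat) (i j fuel : Nat) : Nat :=
  match fuel with
  | 0 => j
  | fuel' + 1 =>
    if 0 < j ∧ l.getD i ' ' ≠ l.getD j ' ' then
      kmpWhile l f i (f.getD (j - 1) 0) fuel'
    else j

-- one iteration of A's `for i in range(1, n)` body, state = (f, j)
def kmpStep (l : List Char) (st : List Nat × Nat) (i : Nat) : List Nat × Nat :=
  let j := kmpWhile l st.1 i st.2 st.2
  if l.getD i ' ' = l.getD j ' ' then (st.1.set i (j + 1), j + 1) else (st.1, j)

def solve (s : String) : Int :=
  let l := s.toList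
  let n := l.length
  let st := (List.range' 1 (n - 1)).foldl (kmpStep l) (List.replicate n 0, 0)
  let fl := st.1.getD (n - 1) 0
  if n % (n - fl) ≠ 0 then 1 else ((n / (n - fl) : Nat) : Int)

-- ===== PORT B =====
-- Source B: b = max(t for t in range(n) if s[:t] == s[n-t:]); on Pre_ (n ≥ 1) the candidate
-- set contains 0, so Python's max is exactly the fold of Nat.max from 0
def solve_alt (s : String) : Int :=
  let l := s.toList
  let n := l.length
  let b := ((List.range n).filter (fun t => l.take t == l.drop (n - t))).foldl Nat.max 0
  let p := n - b
  if n % p == 0 then ((n / p : Nat) : Int) else 1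

-- ===== PRECONDITION & SPEC =====
-- Pre_ excludes exactly the empty string, on which A raises IndexError (f[-1] on the empty list f).
def Pre_solve (s : String) : Prop := s.toList ≠ []
instance (s : String) : Decidable (Pre_solve s) := by unfold Pre_solve; infer_instance
def pvWitness_solve : String := "abab"

def Spec_solve (s : String) (out : Int) : Prop := out = solve_alt s
instance (s : String) (out : Int) : Decidable (Spec_solve s out) := by unfold Spec_solve; infer_instance

-- ===== CLAIM (what is proved, stated in full; the proofs are below) =====
def Claim_equal_solve : Prop := ∀ (s : String), Dom_solve s → Pre_solve s → Spec_solve s (solve s)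

-- ===== LEMMAS AND PROOFS =====

-- `brd l m t`: t is a border of the length-m prefix of l (proper: t < m)
def brd (l : List Char) (m t : Nat) : Prop :=
  t < m ∧ ∀ i < t, l.getD i ' ' = l.getD (m - t + i) ' '

def brdB (l : List Char) (m t : Nat) : Bool :=
  decide (t < m) && ((List.range t).all fun i => l.getD i ' ' == l.getD (m - t + i) ' ')

theorem brdB_iff (l : List Char) (m t : Nat) : brdB l m t = true ↔ brd l m t := by
  simp [brdB, brd, List.all_eq_true, List.mem_range]

-- longest proper border of the length-m prefix
def maxBrd (l : List Char) (m : Nat) : Nat :=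
  Nat.findGreatest (fun t => brdB l m t = true) (m - 1)

theorem brd_zero (l : List Char) (m : Nat) (h : 0 < m) : brd l m 0 :=
  ⟨h, fun i hi => absurd hi (Nat.not_lt_zero i)⟩

theorem maxBrd_brd (l : List Char) (m : Nat) (h : 0 < m) : brd l m (maxBrd l m) := by
  have h0 : brdB l m 0 = true := (brdB_iff l m 0).mpr (brd_zero l m h)
  unfold maxBrd
  exact (brdB_iff l m _).mp
    (Nat.findGreatest_spec (P := fun t => brdB l m t = true) (Nat.zero_le (m - 1)) h0)

theorem le_maxBrd (l : List Char) (m t : Nat) (h : brd l m t) : t ≤ maxBrd l m := by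
  unfold maxBrd
  exact Nat.le_findGreatest (by have := h.1; omega) ((brdB_iff l m t).mpr h)

theorem maxBrd_le (l : List Char) (m : Nat) : maxBrd l m ≤ m - 1 :=
  Nat.findGreatest_le _

theorem maxBrd_eq_of (l : List Char) (m t : Nat) (h : brd l m t)
    (hmax : ∀ u, brd l m u → u ≤ t) : maxBrd l m = t := by
  have hm : 0 < m := by have := h.1; omega
  exact le_antisymm (hmax _ (maxBrd_brd l m hm)) (le_maxBrd l m t h)

-- adding one character: borders of the (m+1)-prefix
theorem brd_step (l : List Char) (m t : Nat) :
    brd l (m + 1) (t + 1) ↔ brd l m t ∧ l.getD t ' ' = l.getD m ' ' := by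
  constructor
  · rintro ⟨h1, h2⟩
    have ht : t < m := by omega
    refine ⟨⟨ht, fun i hi => ?_⟩, ?_⟩
    · have := h2 i (by omega)
      have e : m + 1 - (t + 1) + i = m - t + i := by omega
      rwa [e] at this
    · have := h2 t (by omega)
      have e : m + 1 - (t + 1) + t = m := by omega
      rwa [e] at this
  · rintro ⟨⟨ht, h2⟩, h3⟩
    refine ⟨by omega, fun i hi => ?_⟩
    have e : m + 1 - (t + 1) + i = m - t + i := by omega
    rw [e]
    rcases Nat.lt_or_ge i t with h | h
    · exact h2 i h
    · have : i = t := by omega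
      subst this
      have e2 : m - i + i = m := by omega
      rw [e2]; exact h3

-- a shorter border is a border of the longer border (prefix)
theorem brd_chain (l : List Char) (m a b : Nat) (ha : brd l m a) (hb : brd l m b)
    (hba : b < a) : brd l a b := by
  refine ⟨hba, fun i hi => ?_⟩
  have h1 := hb.2 i hi
  have h2 := ha.2 (a - b + i) (by omega)
  have ham := ha.1
  have e : m - a + (a - b + i) = m - b + i := by omega
  rw [e] at h2
  rw [h1, ← h2]

-- a border of a border is a border
theorem brd_lift (l : List Char) (m a b : Nat) (ha : brd l m a) (hb : brd l a b) :
    brd l m b := by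
  have ham := ha.1
  have hba := hb.1
  refine ⟨by omega, fun i hi => ?_⟩
  have h1 := hb.2 i hi
  have h2 := ha.2 (a - b + i) (by omega)
  have e : m - a + (a - b + i) = m - b + i := by omega
  rw [e] at h2
  rw [h1, h2]

-- correctness of the while loop: it descends the border chain of the length-i prefix
theorem kmpWhile_correct (l : List Char) (f : List Nat) (i : Nat)
    (hf : ∀ k, k < i → f.getD k 0 = maxBrd l (k + 1)) :
    ∀ fuel j, j ≤ fuel → brd l i j →
      (∀ t, brd l i t → t ≤ j ∨ l.getD t ' ' ≠ l.getD i ' ') →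
      brd l i (kmpWhile l f i j fuel) ∧
      (∀ t, brd l i t → t ≤ kmpWhile l f i j fuel ∨ l.getD t ' ' ≠ l.getD i ' ') ∧
      (kmpWhile l f i j fuel = 0 ∨ l.getD i ' ' = l.getD (kmpWhile l f i j fuel) ' ') := by
  intro fuel
  induction fuel with
  | zero =>
    intro j hj hb hmax
    have hj0 : j = 0 := Nat.le_zero.mp hj
    subst hj0
    exact ⟨hb, hmax, Or.inl rfl⟩
  | succ fuel ih =>
    intro j hj hb hmax
    by_cases hcond : 0 < j ∧ l.getD i ' ' ≠ l.getD j ' '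
    · rw [kmpWhile, if_pos hcond]
      obtain ⟨hj0, hne⟩ := hcond
      have hji : j < i := hb.1
      have hfv : f.getD (j - 1) 0 = maxBrd l (j - 1 + 1) := hf (j - 1) (by omega)
      have e : j - 1 + 1 = j := by omega
      rw [e] at hfv
      have hb2j : brd l j (f.getD (j - 1) 0) := hfv ▸ maxBrd_brd l j hj0
      have hb2 : brd l i (f.getD (j - 1) 0) := brd_lift l i j _ hb hb2j
      have hle : f.getD (j - 1) 0 ≤ j - 1 := hfv ▸ maxBrd_le l j
      apply ih _ (by omega) hb2
      intro t ht
      rcases hmax t ht with hle' | hne'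
      · by_cases htj : t = j
        · right; rw [htj]; exact fun hc => hne hc.symm
        · left
          have hbt : brd l j t := brd_chain l i j t hb ht (by omega)
          exact hfv ▸ le_maxBrd l j t hbt
      · right; exact hne'
    · rw [kmpWhile, if_neg hcond]
      refine ⟨hb, hmax, ?_⟩
      by_cases h0 : j = 0
      · exact Or.inl h0
      · rcases Decidable.not_and_iff_not_or_not.mp hcond with h | h
        · omega
        · exact Or.inr (Decidable.not_not.mp h)

theorem getD_set_ne (xs : List Nat) (i k : Nat) (v : Nat) (h : i ≠ k) :
    (xs.set i v).getD k 0 = xs.getD k 0 := by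
  simp [List.getD_eq_getElem?_getD, h]

theorem getD_set_self (xs : List Nat) (i : Nat) (v : Nat) (h : i < xs.length) :
    (xs.set i v).getD i 0 = v := by
  simp [List.getD_eq_getElem?_getD, h]

-- main loop invariant: after processing i = 1..c, f holds the failure function and j its last value
theorem kmpLoop_inv (l : List Char) :
    ∀ c, c + 1 ≤ l.length →
      ((List.range' 1 c).foldl (kmpStep l) (List.replicate l.length 0, 0)).1.length = l.length ∧
      (∀ k, k ≤ c → ((List.range' 1 c).foldl (kmpStep l) (List.replicate l.length 0, 0)).1.getD k 0 = maxBrd l (k + 1)) ∧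
      (∀ k, c < k → ((List.range' 1 c).foldl (kmpStep l) (List.replicate l.length 0, 0)).1.getD k 0 = 0) ∧
      ((List.range' 1 c).foldl (kmpStep l) (List.replicate l.length 0, 0)).2 = maxBrd l (c + 1) := by
  intro c
  induction c with
  | zero =>
    intro _
    refine ⟨by simp, ?_, ?_, ?_⟩
    · intro k hk
      have : k = 0 := Nat.le_zero.mp hk
      subst this
      simp [maxBrd]
    · intro k _; simp
    · simp [maxBrd]
  | succ c ih =>
    intro hc
    obtain ⟨ihlen, ihset, ihzero, ihj⟩ := ih (by omega)
    rw [List.range'_concat, List.foldl_append]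
    set st := (List.range' 1 c).foldl (kmpStep l) (List.replicate l.length 0, 0) with hst
    simp only [List.foldl_cons, List.foldl_nil]
    have hi1 : 1 + 1 * c = c + 1 := by omega
    rw [hi1]
    have hipos : 0 < c + 1 := by omega
    have hW := kmpWhile_correct l st.1 (c + 1)
      (fun k hk => ihset k (by omega)) st.2 st.2 (le_refl _)
      (ihj ▸ maxBrd_brd l (c + 1) hipos)
      (fun t ht => Or.inl (ihj ▸ le_maxBrd l (c + 1) t ht))
    set j' := kmpWhile l st.1 (c + 1) st.2 st.2 with hj'
    obtain ⟨hbj', hmaxj', hexit⟩ := hW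
    unfold kmpStep
    rw [← hj']
    by_cases hmatch : l.getD (c + 1) ' ' = l.getD j' ' '
    · rw [if_pos hmatch]
      have hjlt : j' < c + 1 := hbj'.1
      have hnew : maxBrd l (c + 1 + 1) = j' + 1 := by
        apply maxBrd_eq_of
        · exact (brd_step l (c + 1) j').mpr ⟨hbj', hmatch.symm⟩
        · intro u hu
          cases u with
          | zero => omega
          | succ t =>
            obtain ⟨hbt, hgt⟩ := (brd_step l (c + 1) t).mp hu
            rcases hmaxj' t hbt with h | h
            · omega
            · exact absurd hgt h
      have hlen : c + 1 < st.1.length := by rw [ihlen]; omega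
      refine ⟨by simp [ihlen], ?_, ?_, ?_⟩
      · intro k hk
        by_cases hki : k = c + 1
        · subst hki
          rw [getD_set_self st.1 (c + 1) (j' + 1) hlen, hnew]
        · rw [getD_set_ne st.1 (c + 1) k (j' + 1) (fun h => hki h.symm)]
          exact ihset k (by omega)
      · intro k hk
        rw [getD_set_ne st.1 (c + 1) k (j' + 1) (by omega)]
        exact ihzero k (by omega)
      · exact hnew.symm
    · rw [if_neg hmatch]
      have hj0 : j' = 0 := by
        rcases hexit with h | h
        · exact h
        · exact absurd h hmatch
      have hnew : maxBrd l (c + 1 + 1) = 0 := by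
        apply maxBrd_eq_of
        · exact brd_zero l (c + 1 + 1) (by omega)
        · intro u hu
          cases u with
          | zero => omega
          | succ t =>
            obtain ⟨hbt, hgt⟩ := (brd_step l (c + 1) t).mp hu
            rcases hmaxj' t hbt with h | h
            · have ht0 : t = 0 := by omega
              subst ht0
              rw [hj0] at hmatch
              exact absurd hgt.symm hmatch
            · exact absurd hgt h
      refine ⟨ihlen, ?_, ?_, ?_⟩
      · intro k hk
        by_cases hki : k = c + 1
        · subst hki
          rw [ihzero (c + 1) (by omega), hnew]
        · exact ihset k (by omega)
      · intro k hk; exact ihzero k (by omega)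
      · simpa [hj0] using hnew.symm

-- B-side: the take/drop test is exactly the border predicate
theorem take_drop_iff_brd (l : List Char) (t : Nat) (ht : t < l.length) :
    (l.take t = l.drop (l.length - t)) ↔ brd l l.length t := by
  constructor
  · intro h
    refine ⟨ht, fun i hi => ?_⟩
    have h1 := congrArg (fun xs => xs[i]?) h
    simp only [List.getElem?_take, List.getElem?_drop, hi, if_pos] at h1
    rw [List.getD_eq_getElem?_getD, List.getD_eq_getElem?_getD, h1]
  · rintro ⟨_, h⟩
    apply List.ext_getElem?
    intro i
    rw [List.getElem?_take, List.getElem?_drop]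
    rcases Nat.lt_or_ge i t with hi | hi
    · rw [if_pos hi]
      have hthis := h i hi
      have e1 : i < l.length := by omega
      have e2 : l.length - t + i < l.length := by omega
      rw [List.getD_eq_getElem?_getD, List.getD_eq_getElem?_getD,
        List.getElem?_eq_getElem e1, List.getElem?_eq_getElem e2] at hthis
      simp only [Option.getD_some] at hthis
      rw [List.getElem?_eq_getElem e1, List.getElem?_eq_getElem e2, hthis]
    · rw [if_neg (by omega)]
      exact (List.getElem?_eq_none (by omega)).symm

theorem le_foldl_max_init (xs : List Nat) (a : Nat) : a ≤ xs.foldl Nat.max a := by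
  induction xs generalizing a with
  | nil => exact le_refl a
  | cons y ys ih => exact le_trans (Nat.le_max_left a y) (ih (Nat.max a y))

theorem le_foldl_max_of_mem (xs : List Nat) (a x : Nat) (h : x ∈ xs) :
    x ≤ xs.foldl Nat.max a := by
  induction xs generalizing a with
  | nil => cases h
  | cons y ys ih =>
    rcases List.mem_cons.mp h with h | h
    · subst h
      exact le_trans (Nat.le_max_right a x) (le_foldl_max_init ys _)
    · exact ih _ h

theorem foldl_max_le (xs : List Nat) (a m : Nat) (ha : a ≤ m) (h : ∀ x ∈ xs, x ≤ m) :
    xs.foldl Nat.max a ≤ m := by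
  induction xs generalizing a with
  | nil => exact ha
  | cons y ys ih =>
    exact ih _ (Nat.max_le.mpr ⟨ha, h y (List.mem_cons_self)⟩)
      (fun x hx => h x (List.mem_cons_of_mem y hx))

theorem bside_eq_maxBrd (l : List Char) (hl : l ≠ []) :
    ((List.range l.length).filter (fun t => l.take t == l.drop (l.length - t))).foldl Nat.max 0
      = maxBrd l l.length := by
  have hn : 0 < l.length := List.length_pos_iff.mpr hl
  apply le_antisymm
  · apply foldl_max_le
    · have := maxBrd_brd l l.length hn
      exact Nat.zero_le _
    · intro x hx
      rw [List.mem_filter, List.mem_range] at hx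
      obtain ⟨hx1, hx2⟩ := hx
      have : l.take x = l.drop (l.length - x) := by
        exact beq_iff_eq.mp hx2
      exact le_maxBrd l l.length x ((take_drop_iff_brd l x hx1).mp this)
  · apply le_foldl_max_of_mem
    rw [List.mem_filter, List.mem_range]
    have hb := maxBrd_brd l l.length hn
    exact ⟨hb.1, beq_iff_eq.mpr ((take_drop_iff_brd l _ hb.1).mpr hb)⟩

-- ===== VERDICT (by name: the statement is the Claim_ definition above) =====
theorem solve_spec : Claim_equal_solve := by
  intro s _ hpre
  have hne : s.toList ≠ [] := hpre
  have hn1 : 1 ≤ s.toList.length := List.length_pos_iff.mpr hne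
  obtain ⟨_, hset, _, _⟩ := kmpLoop_inv s.toList (s.toList.length - 1) (by omega)
  have hfl : ((List.range' 1 (s.toList.length - 1)).foldl (kmpStep s.toList)
      (List.replicate s.toList.length 0, 0)).1.getD (s.toList.length - 1) 0
      = maxBrd s.toList s.toList.length := by
    have := hset (s.toList.length - 1) (le_refl _)
    rwa [(by omega : s.toList.length - 1 + 1 = s.toList.length)] at this
  unfold Spec_solve
  show solve s = solve_alt s
  simp only [solve, solve_alt]
  rw [hfl, bside_eq_maxBrd s.toList hne]
  by_cases h : s.toList.length % (s.toList.length - maxBrd s.toList s.toList.length) = 0 <;>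
    simp [h]
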